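-- pv_equiv track=rewrite | github.com/rolandonanet/python_01 | ex10.py | checkSpy
-- ===== SOURCE A (Python) =====
-- def checkSpy(num_list):
--     first_zero = False
--     second_zero = False
--     for num in num_list:
--         if second_zero and num == 7:
--             return True
--         if not second_zero and first_zero and num == 0:
--             second_zero = True
--         if not first_zero and num == 0:
--             first_zero = True
--     return False
-- ===== SOURCE B (Python) =====
-- def checkSpy(num_list):
--     try:
--         i = num_list.index(0)
--         j = num_list.index(0, i + 1)
--         return 7 in num_list[j + 1:]
--     except ValueError:
--         return False
-- ===== Notes on version B (the rewrite author's own statement) =====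
-- stated objective: idiomatic
-- what changed: Replaced the single-pass two-boolean-flag state machine by sequential library scans: index of the first 0, index of the next 0 after it, then a membership test for 7 in the remaining slice, with try/except ValueError returning False.
import Mathlib
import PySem

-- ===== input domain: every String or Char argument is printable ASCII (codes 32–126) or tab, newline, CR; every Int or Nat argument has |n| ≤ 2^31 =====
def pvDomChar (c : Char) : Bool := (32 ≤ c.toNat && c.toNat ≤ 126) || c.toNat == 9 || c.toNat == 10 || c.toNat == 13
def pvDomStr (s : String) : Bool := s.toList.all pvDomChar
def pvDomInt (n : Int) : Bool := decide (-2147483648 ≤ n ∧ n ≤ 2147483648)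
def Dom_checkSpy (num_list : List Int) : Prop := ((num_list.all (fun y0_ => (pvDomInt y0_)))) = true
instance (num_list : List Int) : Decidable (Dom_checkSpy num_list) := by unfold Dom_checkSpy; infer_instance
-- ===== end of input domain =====

-- B replaces A's two-flag single-pass state machine by sequential index scans
-- (find first 0, find a later 0, then test 7 in the remaining slice) — idiomatic rewrite, same cost.

-- ===== PORT A =====
-- the for-loop with flags first_zero/second_zero, as structural recursion over the same state
def checkSpyAux (l : List Int) (first_zero second_zero : Bool) : Bool :=
  match l with
  | [] => false
  | num :: rest =>
    if second_zero && num == 7 then true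
    else
      let second_zero' := if !second_zero && first_zero && num == 0 then true else second_zero
      let first_zero' := if !first_zero && num == 0 then true else first_zero
      checkSpyAux rest first_zero' second_zero'

def checkSpy (num_list : List Int) : Bool := checkSpyAux num_list false false

-- ===== PORT B =====
-- num_list.index(0) → index?; num_list.index(0, i+1) → i+1 + index in the dropped tail
-- (exact: list.index with a nonnegative start searches the suffix); 7 in num_list[j+1:] → membership in slice
def checkSpy_alt (num_list : List Int) : Bool :=
  match PySem.List.index? num_list 0 with
  | none => false                                   -- except ValueError: return False
  | some i =>
    match PySem.List.index? (num_list.drop (i + 1)) 0 with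
    | none => false                                 -- except ValueError: return False
    | some k =>
      decide ((7 : Int) ∈ PySem.List.slice num_list (some (((i + 1 + k + 1 : Nat) : Int))) none)

-- ===== PRECONDITION & SPEC =====
def Spec_checkSpy (num_list : List Int) (out : Bool) : Prop := out = checkSpy_alt num_list
instance (num_list : List Int) (out : Bool) : Decidable (Spec_checkSpy num_list out) := by unfold Spec_checkSpy; infer_instance

-- ===== CLAIM =====
def Claim_equal_checkSpy : Prop := ∀ (num_list : List Int), Dom_checkSpy num_list → Spec_checkSpy num_list (checkSpy num_list)

-- ===== LEMMAS AND PROOFS =====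
-- once second_zero is set, the machine just scans for a 7
lemma aux_sz (l : List Int) (fz : Bool) :
    checkSpyAux l fz true = decide ((7 : Int) ∈ l) := by
  induction l generalizing fz with
  | nil => simp [checkSpyAux]
  | cons n rest ih =>
    by_cases h : n = 7
    · subst h; simp [checkSpyAux]
    · simp [checkSpyAux, h, ih, List.mem_cons]
      intro he; exact absurd he.symm h

-- with only first_zero set, the machine finds the next 0, then scans for a 7 after it
lemma aux_fz (l : List Int) :
    checkSpyAux l true false =
      (match PySem.List.index? l 0 with
       | none => false
       | some j => decide ((7 : Int) ∈ l.drop (j + 1))) := by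
  induction l with
  | nil => simp [checkSpyAux, PySem.List.index?]
  | cons n rest ih =>
    by_cases h : n = 0
    · subst h
      rw [PySem.List.index?_cons_self]
      simp [checkSpyAux, aux_sz]
    · rw [PySem.List.index?_cons_of_ne rest h]
      simp only [checkSpyAux, beq_iff_eq, h, if_false, Bool.false_and, Bool.not_false,
        Bool.not_true, Bool.true_and, Bool.false_eq_true]
      rw [ih]
      cases PySem.List.index? rest 0 <;> simp

-- from the initial state, the machine finds the first 0, then runs the first_zero phase on the tail
lemma aux_start (l : List Int) :
    checkSpyAux l false false =
      (match PySem.List.index? l 0 with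
       | none => false
       | some i => checkSpyAux (l.drop (i + 1)) true false) := by
  induction l with
  | nil => simp [checkSpyAux, PySem.List.index?]
  | cons n rest ih =>
    by_cases h : n = 0
    · subst h
      rw [PySem.List.index?_cons_self]
      simp [checkSpyAux]
    · rw [PySem.List.index?_cons_of_ne rest h]
      simp only [checkSpyAux, beq_iff_eq, h, if_false, Bool.false_and, Bool.not_false,
        Bool.true_and, Bool.and_false, Bool.false_eq_true]
      rw [ih]
      cases PySem.List.index? rest 0 <;> simp

-- ===== VERDICT =====
theorem checkSpy_spec : Claim_equal_checkSpy := by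
  intro l _
  unfold Spec_checkSpy checkSpy checkSpy_alt
  rw [aux_start]
  cases hi : PySem.List.index? l 0 with
  | none => rfl
  | some i =>
    simp only [aux_fz]
    cases hk : PySem.List.index? (l.drop (i + 1)) 0 with
    | none => rfl
    | some k =>
      simp only [PySem.List.slice_from_natCast, List.drop_drop]
      congr 2
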